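-- pv_equiv track=rewrite | github.com/lucastaonline/matc30-listas | Lista 1/q5.py | similar_pair
-- ===== SOURCE A (Python) =====
-- class Node:
--     def __init__(self, value, children):
--         self.value = value
--         self.children = children
--         self.parent = None
--
-- def similar_pair(n, k, edges):
--     quantidade__pares_similares = 0
--     nos = {}
--
--     for edge in edges:
--         if edge[0] not in nos:
--             nos[edge[0]] = Node(edge[0], [])
--
--         if edge[1] not in nos:
--             nos[edge[1]] = Node(edge[1], [])
--
--         nos[edge[0]].children.append(nos[edge[1]])
--         nos[edge[1]].parent = nos[edge[0]]
--
--     for no in nos.values():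
--         if no.parent is None:
--             continue
--
--         parent = no.parent
--
--         while parent is not None:
--             if abs(parent.value - no.value) <= k:
--                 quantidade__pares_similares += 1
--
--             parent = parent.parent
--
--     return quantidade__pares_similares
-- ===== SOURCE B (Python) =====
-- def similar_pair(n, k, edges):
--     parent = {}
--     for a, b in edges:
--         parent[b] = a
--     total = 0
--     cur = list(parent.items())
--     while cur:
--         nxt = []
--         for u, a in cur:
--             if abs(a - u) <= k:
--                 total += 1
--             if a in parent:
--                 nxt.append((u, parent[a]))
--         cur = nxt
--     return total
-- ===== Notes on version B (the rewrite author's own statement) =====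
-- stated objective: simpler
-- what changed: Replaces A's mutable Node-object graph and per-node upward while-walks with a plain child-to-parent dict and a single level-synchronous frontier sweep that advances every node's ancestor pointer one generation per round.
import Mathlib
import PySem

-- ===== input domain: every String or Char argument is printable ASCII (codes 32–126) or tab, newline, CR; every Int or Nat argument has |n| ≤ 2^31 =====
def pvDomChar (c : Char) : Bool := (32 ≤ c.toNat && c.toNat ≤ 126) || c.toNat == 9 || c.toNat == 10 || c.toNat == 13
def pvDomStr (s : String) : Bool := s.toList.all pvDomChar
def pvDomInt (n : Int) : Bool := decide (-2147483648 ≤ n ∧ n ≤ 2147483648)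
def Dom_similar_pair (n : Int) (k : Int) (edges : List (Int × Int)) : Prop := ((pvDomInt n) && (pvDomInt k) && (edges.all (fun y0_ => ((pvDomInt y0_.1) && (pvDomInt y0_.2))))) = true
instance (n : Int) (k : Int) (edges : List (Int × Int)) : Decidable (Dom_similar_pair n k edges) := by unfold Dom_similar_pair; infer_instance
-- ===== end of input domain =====

-- B replaces A's Node-object graph and per-node upward while-walks with a child→parent dict and
-- one level-synchronous frontier sweep (simpler, same asymptotic cost).  On a cyclic parent map
-- both Pythons loop forever (no return value is claimed there); both ports carry fuel
-- edges.length + 1, which on every terminating (acyclic) input is never exhausted.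

-- ===== PORT A =====
-- A's `nos` maps each node value to its Node; a Node is observable here only through its value
-- and its (last-assigned) parent's value, so it is ported as Dict Int (Option Int):
-- key = node value, stored value = current parent value (none = no parent yet).  The `children`
-- lists A builds are never read by the counting loop and carry no port.
def pvBuildNos (edges : List (Int × Int)) : PySem.Dict Int (Option Int) :=
  edges.foldl (fun nos e =>
    let nos1 := if nos.contains e.1 then nos else nos.insert e.1 none
    let nos2 := if nos1.contains e.2 then nos1 else nos1.insert e.2 none
    nos2.insert e.2 (some e.1)) PySem.Dict.empty

-- A's `while parent is not None` walk; Python follows object references, which after the build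
-- phase is exactly lookup of the parent's value in `nos`.  The walk carries fuel: on an acyclic
-- parent map a chain has at most edges.length + 1 steps, so fuel is never exhausted.
def pvWalkA (nos : PySem.Dict Int (Option Int)) (k : Int) (v : Int) (p : Option Int) (fuel : Nat) : Int :=
  match fuel, p with
  | _, none => 0
  | 0, some _ => 0
  | fuel+1, some a =>
      (if |a - v| ≤ k then 1 else 0) + pvWalkA nos k v ((nos.get? a).getD none) fuel

def similar_pair (n : Int) (k : Int) (edges : List (Int × Int)) : Int :=
  let nos := pvBuildNos edges
  nos.items.foldl (fun acc it => acc + pvWalkA nos k it.1 it.2 (edges.length + 1)) 0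

-- ===== PORT B =====
def pvParent (edges : List (Int × Int)) : PySem.Dict Int Int :=
  edges.foldl (fun d e => d.insert e.2 e.1) PySem.Dict.empty

-- one round of B's `while cur:` loop: add this generation's matches, build the next frontier
def pvRound (parent : PySem.Dict Int Int) (k : Int) (cur : List (Int × Int)) : Int × List (Int × Int) :=
  cur.foldl (fun st ua =>
    let t := if |ua.2 - ua.1| ≤ k then st.1 + 1 else st.1
    match parent.get? ua.2 with
    | some b => (t, st.2 ++ [(ua.1, b)])
    | none => (t, st.2)) (0, [])

-- B's `while cur:` loop, with fuel: edges.length + 1 rounds suffice on an acyclic parent map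
def pvRounds (parent : PySem.Dict Int Int) (k : Int) (cur : List (Int × Int)) (fuel : Nat) : Int :=
  match fuel with
  | 0 => 0
  | fuel+1 =>
    if cur = [] then 0
    else
      let r := pvRound parent k cur
      r.1 + pvRounds parent k r.2 fuel

def similar_pair_alt (n : Int) (k : Int) (edges : List (Int × Int)) : Int :=
  let parent := pvParent edges
  pvRounds parent k parent.items (edges.length + 1)

-- ===== PRECONDITION & SPEC =====
def Spec_similar_pair (n : Int) (k : Int) (edges : List (Int × Int)) (out : Int) : Prop := out = similar_pair_alt n k edges
instance (n : Int) (k : Int) (edges : List (Int × Int)) (out : Int) : Decidable (Spec_similar_pair n k edges out) := by unfold Spec_similar_pair; infer_instance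

-- ===== CLAIM (what is proved, stated in full; the proofs are below) =====
def Claim_equal_similar_pair : Prop := ∀ (n : Int) (k : Int) (edges : List (Int × Int)), Dom_similar_pair n k edges → Spec_similar_pair n k edges (similar_pair n k edges)

-- ===== LEMMAS AND PROOFS =====

-- the per-node chain count both programs compute: node u, current ancestor a, fuel steps left
def pvChainCnt (parent : PySem.Dict Int Int) (k : Int) (u : Int) (a : Int) : Nat → Int
  | 0 => 0
  | fuel+1 =>
    (if |a - u| ≤ k then 1 else 0) +
      (match parent.get? a with
       | some b => pvChainCnt parent k u b fuel
       | none => 0)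

-- relating nos.items entries to parent.items entries
def pvPairOf (it : Int × Option Int) : Option (Int × Int) := it.2.map (fun a => (it.1, a))

def pvOptCnt (parent : PySem.Dict Int Int) (k : Int) (fuel : Nat) (it : Int × Option Int) : Int :=
  match it.2 with
  | none => 0
  | some a => pvChainCnt parent k it.1 a fuel

def pvStepPair (parent : PySem.Dict Int Int) (ua : Int × Int) : Option (Int × Int) :=
  (parent.get? ua.2).map (fun b => (ua.1, b))

-- A's build step, named so the fold can be reasoned about
def pvStepA (nos : PySem.Dict Int (Option Int)) (e : Int × Int) : PySem.Dict Int (Option Int) :=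
  let nos1 := if nos.contains e.1 then nos else nos.insert e.1 none
  let nos2 := if nos1.contains e.2 then nos1 else nos1.insert e.2 none
  nos2.insert e.2 (some e.1)

theorem pvBuildNos_eq_foldl (edges : List (Int × Int)) :
    pvBuildNos edges = edges.foldl pvStepA PySem.Dict.empty := rfl

-- invariant tying A's nos to B's parent map
def pvInv (nos : PySem.Dict Int (Option Int)) (parent : PySem.Dict Int Int) : Prop :=
  nos.keys.Nodup ∧ parent.keys.Nodup ∧
  (∀ v, nos.get? v = none → parent.get? v = none) ∧
  (∀ v w, nos.get? v = some w → w = parent.get? v)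

theorem pvCondInsert_get? (nos : PySem.Dict Int (Option Int)) (x v : Int) :
    (if nos.contains x then nos else nos.insert x none).get? v =
      if v = x then some ((nos.get? x).getD none) else nos.get? v := by
  by_cases hc : nos.contains x = true
  · rw [if_pos hc]
    rcases eq_or_ne v x with rfl | hv
    · rw [if_pos rfl]
      rw [PySem.Dict.contains_eq_isSome_get?] at hc
      cases hg : nos.get? v with
      | none => rw [hg] at hc; simp at hc
      | some w => simp
    · rw [if_neg hv]
  · rw [if_neg (by simpa using hc)]
    have hn : nos.get? x = none := by
      rw [PySem.Dict.contains_eq_isSome_get?] at hc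
      cases hg : nos.get? x with
      | none => rfl
      | some w => rw [hg] at hc; simp at hc
    rw [PySem.Dict.get?_insert]
    rcases eq_or_ne v x with rfl | hv
    · simp [hn]
    · simp [hv]

theorem pvCondInsert_keys_nodup (nos : PySem.Dict Int (Option Int)) (x : Int)
    (h : nos.keys.Nodup) :
    (if nos.contains x then nos else nos.insert x none).keys.Nodup := by
  by_cases hc : nos.contains x = true
  · rw [if_pos hc]; exact h
  · rw [if_neg (by simpa using hc)]; exact PySem.Dict.nodup_keys_insert _ _ _ h

theorem pvStepA_get? (nos : PySem.Dict Int (Option Int)) (e : Int × Int) (v : Int) :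
    (pvStepA nos e).get? v =
      if v = e.2 then some (some e.1)
      else if v = e.1 then some ((nos.get? e.1).getD none)
      else nos.get? v := by
  simp only [pvStepA]
  rw [PySem.Dict.get?_insert]
  rcases eq_or_ne v e.2 with rfl | hv2
  · simp
  · rw [if_neg hv2, if_neg hv2, pvCondInsert_get?, if_neg hv2, pvCondInsert_get?]

theorem pvInv_step (nos : PySem.Dict Int (Option Int)) (parent : PySem.Dict Int Int)
    (e : Int × Int) (h : pvInv nos parent) :
    pvInv (pvStepA nos e) (parent.insert e.2 e.1) := by
  obtain ⟨h1, h2, h3, h4⟩ := h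
  refine ⟨?_, PySem.Dict.nodup_keys_insert _ _ _ h2, ?_, ?_⟩
  · simp only [pvStepA]
    exact PySem.Dict.nodup_keys_insert _ _ _
      (pvCondInsert_keys_nodup _ _ (pvCondInsert_keys_nodup _ _ h1))
  · intro v hv
    rw [pvStepA_get?] at hv
    rcases eq_or_ne v e.2 with rfl | hv2
    · rw [if_pos rfl] at hv; exact absurd hv (by simp)
    · rw [if_neg hv2] at hv
      rw [PySem.Dict.get?_insert, if_neg hv2]
      rcases eq_or_ne v e.1 with rfl | hv1
      · rw [if_pos rfl] at hv; exact absurd hv (by simp)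
      · rw [if_neg hv1] at hv; exact h3 v hv
  · intro v w hv
    rw [pvStepA_get?] at hv
    rcases eq_or_ne v e.2 with rfl | hv2
    · rw [if_pos rfl] at hv
      rw [PySem.Dict.get?_insert, if_pos rfl]
      simpa using hv.symm
    · rw [if_neg hv2] at hv
      rw [PySem.Dict.get?_insert, if_neg hv2]
      rcases eq_or_ne v e.1 with rfl | hv1
      · rw [if_pos rfl] at hv
        cases hg : nos.get? e.1 with
        | none =>
          rw [hg] at hv
          simp only [Option.getD_none] at hv
          rw [h3 e.1 hg]; simpa using hv.symm
        | some w' =>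
          rw [hg] at hv
          simp only [Option.getD_some] at hv
          rw [← h4 e.1 w' hg]; simpa using hv.symm
      · rw [if_neg hv1] at hv; exact h4 v w hv

theorem pvInv_fold (es : List (Int × Int)) :
    ∀ (nos : PySem.Dict Int (Option Int)) (parent : PySem.Dict Int Int), pvInv nos parent →
      pvInv (es.foldl pvStepA nos) (es.foldl (fun d e => d.insert e.2 e.1) parent) := by
  induction es with
  | nil => intro nos parent h; exact h
  | cons e es ih =>
    intro nos parent h
    exact ih _ _ (pvInv_step nos parent e h)

theorem pvInv_build (edges : List (Int × Int)) :
    pvInv (pvBuildNos edges) (pvParent edges) := by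
  rw [pvBuildNos_eq_foldl]
  exact pvInv_fold edges _ _ ⟨by simp [PySem.Dict.keys_empty], by simp [PySem.Dict.keys_empty],
    fun v _ => by simp [PySem.Dict.get?_empty], fun v w hv => by simp [PySem.Dict.get?_empty] at hv⟩

theorem pvLookup_agree {nos : PySem.Dict Int (Option Int)} {parent : PySem.Dict Int Int}
    (h : pvInv nos parent) (a : Int) : (nos.get? a).getD none = parent.get? a := by
  obtain ⟨_, _, h3, h4⟩ := h
  cases hg : nos.get? a with
  | none => simp [h3 a hg]
  | some w => simpa using h4 a w hg

theorem pvWalkA_eq {nos : PySem.Dict Int (Option Int)} {parent : PySem.Dict Int Int}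
    (h : pvInv nos parent) (k v : Int) :
    ∀ (f : Nat) (p : Option Int),
      pvWalkA nos k v p f = (match p with | none => 0 | some a => pvChainCnt parent k v a f) := by
  intro f
  induction f with
  | zero => intro p; cases p <;> simp [pvWalkA, pvChainCnt]
  | succ f ih =>
    intro p
    cases p with
    | none => simp [pvWalkA]
    | some a =>
      show (if |a - v| ≤ k then (1:Int) else 0) + pvWalkA nos k v ((nos.get? a).getD none) f = _
      rw [pvLookup_agree h a, ih]
      cases hp : parent.get? a with
      | none => simp [pvChainCnt, hp]
      | some b => simp [pvChainCnt, hp]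

theorem pvRound_spec (parent : PySem.Dict Int Int) (k : Int) :
    ∀ (cur : List (Int × Int)) (t0 : Int) (acc0 : List (Int × Int)),
      cur.foldl (fun st ua =>
          let t := if |ua.2 - ua.1| ≤ k then st.1 + 1 else st.1
          match parent.get? ua.2 with
          | some b => (t, st.2 ++ [(ua.1, b)])
          | none => (t, st.2)) (t0, acc0)
        = (t0 + (cur.map (fun ua => if |ua.2 - ua.1| ≤ k then (1:Int) else 0)).sum,
           acc0 ++ cur.filterMap (pvStepPair parent)) := by
  intro cur
  induction cur with
  | nil => intro t0 acc0; simp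
  | cons ua cur ih =>
    intro t0 acc0
    simp only [List.foldl_cons, List.map_cons, List.sum_cons, List.filterMap_cons]
    cases hp : parent.get? ua.2 with
    | none =>
      simp only [hp]
      rw [ih]
      simp only [pvStepPair, hp, Option.map_none, Prod.mk.injEq]
      refine ⟨?_, trivial⟩
      by_cases hik : |ua.2 - ua.1| ≤ k <;> simp [hik] <;> ring
    | some b =>
      simp only [hp]
      rw [ih]
      simp only [pvStepPair, hp, Option.map_some, Prod.mk.injEq]
      refine ⟨?_, by simp⟩
      by_cases hik : |ua.2 - ua.1| ≤ k <;> simp [hik] <;> ring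

theorem pvSum_match_filterMap (parent : PySem.Dict Int Int) (g : Int → Int → Int) :
    ∀ (cur : List (Int × Int)),
      (cur.map (fun ua => match parent.get? ua.2 with | some b => g ua.1 b | none => 0)).sum
        = ((cur.filterMap (pvStepPair parent)).map (fun p => g p.1 p.2)).sum := by
  intro cur
  induction cur with
  | nil => simp
  | cons ua cur ih =>
    simp only [List.map_cons, List.sum_cons, List.filterMap_cons]
    cases hp : parent.get? ua.2 with
    | none => simpa [pvStepPair, hp] using ih
    | some b => simp [pvStepPair, hp, ih]

theorem pvRounds_eq (parent : PySem.Dict Int Int) (k : Int) :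
    ∀ (f : Nat) (cur : List (Int × Int)),
      pvRounds parent k cur f = (cur.map (fun ua => pvChainCnt parent k ua.1 ua.2 f)).sum := by
  intro f
  induction f with
  | zero =>
    intro cur
    simp [pvRounds, pvChainCnt]
  | succ f ih =>
    intro cur
    rcases eq_or_ne cur [] with rfl | hne
    · simp [pvRounds]
    · show (if cur = [] then 0 else
        let r := pvRound parent k cur
        r.1 + pvRounds parent k r.2 f) = _
      rw [if_neg hne]
      show (pvRound parent k cur).1 + pvRounds parent k (pvRound parent k cur).2 f = _
      rw [show pvRound parent k cur = _ from pvRound_spec parent k cur 0 []]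
      simp only [List.nil_append]
      rw [ih, ← pvSum_match_filterMap parent (fun u b => pvChainCnt parent k u b f)]
      have : ∀ ua : Int × Int, pvChainCnt parent k ua.1 ua.2 (f+1) =
          (if |ua.2 - ua.1| ≤ k then (1:Int) else 0) +
          (match parent.get? ua.2 with | some b => pvChainCnt parent k ua.1 b f | none => 0) := by
        intro ua; rfl
      simp only [this]
      rw [zero_add, ← PySem.List.sum_map_add_int]

theorem pvMem_filterMap_pairOf (l : List (Int × Option Int)) (v a : Int) :
    (v, a) ∈ l.filterMap pvPairOf ↔ (v, some a) ∈ l := by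
  rw [List.mem_filterMap]
  constructor
  · rintro ⟨⟨v', p'⟩, hm, he⟩
    cases p' with
    | none => simp [pvPairOf] at he
    | some b =>
      simp only [pvPairOf, Option.map_some, Option.some_inj, Prod.mk.injEq] at he
      obtain ⟨rfl, rfl⟩ := he
      exact hm
  · intro hm
    exact ⟨(v, some a), hm, rfl⟩

theorem pvFst_mem_of_mem_filterMap (l : List (Int × Option Int)) (p : Int × Int)
    (h : p ∈ l.filterMap pvPairOf) : p.1 ∈ l.map Prod.fst := by
  rw [List.mem_filterMap] at h
  obtain ⟨⟨v', p'⟩, hm, he⟩ := h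
  cases p' with
  | none => simp [pvPairOf] at he
  | some b =>
    simp only [pvPairOf, Option.map_some, Option.some_inj] at he
    subst he
    exact List.mem_map_of_mem hm

theorem pvNodup_filterMap_pairOf (l : List (Int × Option Int))
    (h : (l.map Prod.fst).Nodup) : (l.filterMap pvPairOf).Nodup := by
  induction l with
  | nil => simp
  | cons it l ih =>
    simp only [List.map_cons, List.nodup_cons] at h
    obtain ⟨h1, h2⟩ := h
    obtain ⟨v, po⟩ := it
    cases po with
    | none => simpa [pvPairOf] using ih h2
    | some a =>
      simp only [List.filterMap_cons, pvPairOf, Option.map_some, List.nodup_cons]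
      refine ⟨fun hm => ?_, ih h2⟩
      exact h1 (pvFst_mem_of_mem_filterMap l (v, a) hm)

theorem pvItems_perm (edges : List (Int × Int)) :
    ((pvBuildNos edges).items.filterMap pvPairOf).Perm (pvParent edges).items := by
  have h := pvInv_build edges
  obtain ⟨h1, h2, h3, h4⟩ := h
  have hnd1 : ((pvBuildNos edges).items.filterMap pvPairOf).Nodup :=
    pvNodup_filterMap_pairOf _ h1
  have hnd2 : (pvParent edges).items.Nodup := h2.of_map Prod.fst
  rw [List.perm_ext_iff_of_nodup hnd1 hnd2]
  rintro ⟨v, a⟩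
  rw [pvMem_filterMap_pairOf]
  rw [← PySem.Dict.get?_eq_some_iff_mem_items _ _ _ h1,
      ← PySem.Dict.get?_eq_some_iff_mem_items _ _ _ h2]
  constructor
  · intro hg
    exact (h4 v (some a) hg).symm
  · intro hg
    cases hn : (pvBuildNos edges).get? v with
    | none => rw [h3 v hn] at hg; exact absurd hg (by simp)
    | some w =>
      have hw : w = some a := by rw [h4 v w hn, hg]
      rw [hw]

theorem pvSum_optCnt (parent : PySem.Dict Int Int) (k : Int) (f : Nat) :
    ∀ (l : List (Int × Option Int)),
      (l.map (pvOptCnt parent k f)).sum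
        = ((l.filterMap pvPairOf).map (fun p => pvChainCnt parent k p.1 p.2 f)).sum := by
  intro l
  induction l with
  | nil => simp
  | cons it l ih =>
    obtain ⟨v, po⟩ := it
    cases po with
    | none => simpa [pvOptCnt, pvPairOf] using ih
    | some a => simp [pvOptCnt, pvPairOf, ih]

-- ===== VERDICT (by name: the statement is the Claim_ definition above) =====
theorem similar_pair_spec : Claim_equal_similar_pair := by
  intro n k edges _
  unfold Spec_similar_pair
  simp only [similar_pair, similar_pair_alt]
  rw [PySem.List.foldl_add (g := fun it : Int × Option Int =>
        pvWalkA (pvBuildNos edges) k it.1 it.2 (edges.length + 1)), zero_add]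
  have hinv := pvInv_build edges
  have hmap : ((pvBuildNos edges).items.map
      (fun it => pvWalkA (pvBuildNos edges) k it.1 it.2 (edges.length + 1)))
      = (pvBuildNos edges).items.map (pvOptCnt (pvParent edges) k (edges.length + 1)) := by
    apply List.map_congr_left
    rintro ⟨v, po⟩ _
    rw [pvWalkA_eq hinv k v (edges.length + 1) po]
    cases po <;> rfl
  rw [hmap]
  rw [pvSum_optCnt]
  rw [pvRounds_eq]
  have hperm := (pvItems_perm edges).map (fun p => pvChainCnt (pvParent edges) k p.1 p.2 (edges.length + 1))
  exact hperm.sum_eq
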